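-- pv_equiv track=rewrite | github.com/Jyothi3659/hackerrankproblems | stacks/stack_andxoror.py | andXorOr
-- ===== SOURCE A (Python) =====
-- def andXorOr(a):
--     max_s = 0
--     for i in range(len(a)):
--         for j in range(i+1,len(a)):
--             s1 = ((j & i) ^ (j | i) & (j ^ i))
--             if max_s < s1:
--                 max_s = s1
--     return max_s
-- ===== SOURCE B (Python) =====
-- def andXorOr(a):
--     # s1 = (j&i) ^ ((j|i) & (j^i)) simplifies to i|j, so the answer depends
--     # only on n = len(a): the max OR of two distinct indices in [0, n-1],
--     # which is 2**(n-1).bit_length() - 1 for n >= 2, else 0.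
--     n = len(a)
--     if n < 2:
--         return 0
--     return (1 << (n - 1).bit_length()) - 1
-- ===== Notes on version B (the rewrite author's own statement) =====
-- stated objective: faster
-- what changed: The quadratic scan over index pairs is replaced by the closed form: s1 = (j&i)^((j|i)&(j^i)) equals i|j, and the max OR of two distinct indices below n is 2**bit_length(n-1)-1, computed in O(1) from len(a).
import Mathlib
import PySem

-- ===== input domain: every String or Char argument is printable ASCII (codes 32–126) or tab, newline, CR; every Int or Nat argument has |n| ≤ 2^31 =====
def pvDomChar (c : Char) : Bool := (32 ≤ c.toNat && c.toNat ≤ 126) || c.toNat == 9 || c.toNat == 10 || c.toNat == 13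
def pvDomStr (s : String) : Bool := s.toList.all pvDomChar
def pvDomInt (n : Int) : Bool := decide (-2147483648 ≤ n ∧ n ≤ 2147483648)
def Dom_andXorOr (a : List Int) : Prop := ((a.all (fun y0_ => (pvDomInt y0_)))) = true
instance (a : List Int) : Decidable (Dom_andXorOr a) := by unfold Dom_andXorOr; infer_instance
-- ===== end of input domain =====

-- B replaces A's quadratic scan over index pairs by a closed form: the scanned
-- expression equals i|j, whose maximum over distinct indices below n is
-- 2^bit_length(n-1) - 1 (0 for n < 2); the list's values are never used.


-- ===== PORT A =====
-- s1 = ((j & i) ^ (j | i) & (j ^ i))  — Python precedence: (j&i) ^ ((j|i) & (j^i))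
def pyS1 (i j : Int) : Int :=
  PySem.Int.bxor (PySem.Int.band j i) (PySem.Int.band (PySem.Int.bor j i) (PySem.Int.bxor j i))

def andXorOr (a : List Int) : Int :=
  (PySem.List.pyRange 0 (a.length : Int) 1).foldl (fun max_s i =>
    (PySem.List.pyRange (i + 1) (a.length : Int) 1).foldl (fun max_s j =>
      let s1 := pyS1 i j
      if max_s < s1 then s1 else max_s) max_s) 0

-- ===== PORT B =====
def andXorOr_alt (a : List Int) : Int :=
  if (a.length : Int) < 2 then 0 else (1 <<< PySem.Int.bitLength ((a.length : Int) - 1)) - 1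

-- ===== PRECONDITION & SPEC =====
def Spec_andXorOr (a : List Int) (out : Int) : Prop := out = andXorOr_alt a
instance (a : List Int) (out : Int) : Decidable (Spec_andXorOr a out) := by unfold Spec_andXorOr; infer_instance

-- ===== CLAIM (what is proved, stated in full; the proofs are below) =====
def Claim_equal_andXorOr : Prop := ∀ (a : List Int), Dom_andXorOr a → Spec_andXorOr a (andXorOr a)

-- ===== LEMMAS AND PROOFS =====

-- The scanned expression is the OR of the two (nonnegative) indices.
theorem pyS1_eq (i j : Int) (hi : 0 ≤ i) (hj : 0 ≤ j) :
    pyS1 i j = ((j.toNat ||| i.toNat : Nat) : Int) := by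
  obtain ⟨p, rfl⟩ : ∃ p : Nat, i = (p : Int) := ⟨i.toNat, by omega⟩
  obtain ⟨q, rfl⟩ : ∃ q : Nat, j = (q : Int) := ⟨j.toNat, by omega⟩
  unfold pyS1
  rw [PySem.Int.band_natCast, PySem.Int.bxor_natCast, PySem.Int.bor_natCast,
      PySem.Int.band_natCast, PySem.Int.bxor_natCast, Int.toNat_natCast, Int.toNat_natCast]
  congr 1
  apply Nat.eq_of_testBit_eq; intro k
  simp [Nat.testBit_xor]
  cases q.testBit k <;> cases p.testBit k <;> decide

-- max-fold facts (inner loop shape: m ↦ if m < g j then g j else m)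
theorem inner_ge_init (g : Int → Int) (l : List Int) (m : Int) :
    m ≤ l.foldl (fun m j => if m < g j then g j else m) m := by
  induction l generalizing m with
  | nil => simp
  | cons x l ih =>
      simp only [List.foldl_cons]
      refine le_trans ?_ (ih _)
      split <;> omega

theorem inner_le (g : Int → Int) (l : List Int) (b m : Int) (hm : m ≤ b)
    (h : ∀ j ∈ l, g j ≤ b) :
    l.foldl (fun m j => if m < g j then g j else m) m ≤ b := by
  induction l generalizing m with
  | nil => simpa
  | cons x l ih =>
      simp only [List.foldl_cons]
      refine ih _ ?_ (fun j hj => h j (List.mem_cons_of_mem _ hj))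
      have := h x (List.mem_cons_self)
      split <;> omega

theorem inner_mem (g : Int → Int) (l : List Int) (m j : Int) (hj : j ∈ l) :
    g j ≤ l.foldl (fun m j => if m < g j then g j else m) m := by
  induction l generalizing m with
  | nil => cases hj
  | cons x l ih =>
      simp only [List.foldl_cons]
      rcases List.mem_cons.mp hj with rfl | hj
      · refine le_trans ?_ (inner_ge_init g l _)
        split <;> omega
      · exact ih _ hj

-- outer loop: G m i = inner fold over pyRange (i+1) N 1
theorem outer_ge_init (N : Int) (l : List Int) (m : Int) :
    m ≤ l.foldl (fun m i => (PySem.List.pyRange (i + 1) N 1).foldl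
      (fun m j => if m < pyS1 i j then pyS1 i j else m) m) m := by
  induction l generalizing m with
  | nil => simp
  | cons x l ih =>
      simp only [List.foldl_cons]
      exact le_trans (inner_ge_init _ _ _) (ih _)

theorem outer_le (N : Int) (l : List Int) (b m : Int) (hm : m ≤ b)
    (h : ∀ i ∈ l, ∀ j, i + 1 ≤ j → j < N → pyS1 i j ≤ b) :
    l.foldl (fun m i => (PySem.List.pyRange (i + 1) N 1).foldl
      (fun m j => if m < pyS1 i j then pyS1 i j else m) m) m ≤ b := by
  induction l generalizing m with
  | nil => simpa
  | cons x l ih =>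
      simp only [List.foldl_cons]
      refine ih _ ?_ (fun i hi => h i (List.mem_cons_of_mem _ hi))
      refine inner_le _ _ _ _ hm (fun j hj => ?_)
      have := (PySem.List.mem_pyRange_one).mp hj
      exact h x List.mem_cons_self j this.1 this.2

theorem outer_mem (N : Int) (l : List Int) (m i j : Int) (hi : i ∈ l)
    (hj : j ∈ PySem.List.pyRange (i + 1) N 1) :
    pyS1 i j ≤ l.foldl (fun m i => (PySem.List.pyRange (i + 1) N 1).foldl
      (fun m j => if m < pyS1 i j then pyS1 i j else m) m) m := by
  induction l generalizing m with
  | nil => cases hi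
  | cons x l ih =>
      simp only [List.foldl_cons]
      rcases List.mem_cons.mp hi with rfl | hi
      · exact le_trans (inner_mem _ _ _ _ hj) (outer_ge_init N l _)
      · exact ih _ hi

theorem pow_or (K : Nat) (h : 1 ≤ K) : 2 ^ (K - 1) ||| (2 ^ (K - 1) - 1) = 2 ^ K - 1 := by
  apply Nat.eq_of_testBit_eq; intro k
  simp [Nat.testBit_two_pow, Nat.testBit_two_pow_sub_one]
  rcases Nat.lt_trichotomy k (K - 1) with h1 | h1 | h1
  · simp [h1]; omega
  · simp [h1]; omega
  · have h2 : ¬ (K - 1 = k) := by omega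
    simp [h2]; omega

theorem bitLength_pos (n : Int) (h : n ≠ 0) : 1 ≤ PySem.Int.bitLength n := by
  by_contra h2
  have h3 := PySem.Int.lt_two_pow_bitLength n
  simp at h2
  rw [h2] at h3; simp at h3; omega

-- ===== VERDICT (by name: the statement is the Claim_ definition above) =====
theorem andXorOr_spec : Claim_equal_andXorOr := by
  intro a _
  unfold Spec_andXorOr andXorOr andXorOr_alt
  by_cases hn : (a.length : Int) < 2
  · -- n < 2: outer range is [] or [0] with empty inner range
    rw [if_pos hn]
    have h01 : a.length = 0 ∨ a.length = 1 := by omega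
    rcases h01 with h | h <;> rw [h] <;> decide
  · rw [if_neg hn]
    set N : Int := (a.length : Int) with hN
    have hN2 : 2 ≤ N := by omega
    set K : Nat := PySem.Int.bitLength (N - 1) with hK
    have hK1 : 1 ≤ K := bitLength_pos _ (by omega)
    have hlt : (N - 1).toNat < 2 ^ K := by
      have h := PySem.Int.lt_two_pow_bitLength (N - 1)
      rw [← hK] at h; omega
    have hle : 2 ^ (K - 1) ≤ (N - 1).toNat := by
      have h := PySem.Int.two_pow_bitLength_le (N - 1) (by omega)
      rw [← hK] at h; omega
    have hKpos : (1 : Nat) ≤ 2 ^ K := Nat.one_le_two_pow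
    have hshift : (1 <<< K : Int) = ((2 ^ K : Nat) : Int) := by
      simp [Int.shiftLeft_eq]
    rw [hshift]
    show List.foldl (fun m i => List.foldl (fun m j => if m < pyS1 i j then pyS1 i j else m)
        m (PySem.List.pyRange (i + 1) N 1)) 0 (PySem.List.pyRange 0 N 1)
      = ((2 ^ K : Nat) : Int) - 1
    apply le_antisymm
    · -- every pair value is ≤ 2^K - 1
      refine outer_le N _ _ _ (by omega) ?_
      intro i hi j hij hjN
      have hi0 : 0 ≤ i := ((PySem.List.mem_pyRange_one).mp hi).1
      rw [pyS1_eq i j hi0 (by omega)]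
      have hor : j.toNat ||| i.toNat < 2 ^ K :=
        Nat.bitwise_lt_two_pow (by omega) (by omega)
      omega
    · -- the pair (2^(K-1)-1, 2^(K-1)) attains 2^K - 1
      set i0 : Int := ((2 ^ (K - 1) - 1 : Nat) : Int) with hi0
      set j0 : Int := ((2 ^ (K - 1) : Nat) : Int) with hj0
      have hp : (1 : Nat) ≤ 2 ^ (K - 1) := Nat.one_le_two_pow
      have h1 : i0 ∈ PySem.List.pyRange 0 N 1 := by
        rw [PySem.List.mem_pyRange_one]; omega
      have h2 : j0 ∈ PySem.List.pyRange (i0 + 1) N 1 := by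
        rw [PySem.List.mem_pyRange_one]; omega
      have hmem := outer_mem N (PySem.List.pyRange 0 N 1) 0 i0 j0 h1 h2
      rw [pyS1_eq i0 j0 (by omega) (by omega)] at hmem
      have htn : j0.toNat ||| i0.toNat = 2 ^ K - 1 := by
        have hj0' : j0.toNat = 2 ^ (K - 1) := by omega
        have hi0' : i0.toNat = 2 ^ (K - 1) - 1 := by omega
        rw [hj0', hi0']; exact pow_or K hK1
      rw [htn] at hmem
      omega
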